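-- pv_equiv track=rewrite | github.com/Ahaduzzamankhan/Android-lock-recovery | password_cracker.py | _generate_from_mask
-- ===== SOURCE A (Python) =====
-- import itertools
--
-- def _generate_from_mask(mask, charset):
--     """Generate passwords from mask with wildcards"""
--     import re
--
--     # Convert mask to pattern
--     pattern = mask.replace('?', '.')
--
--     # For simple masks, generate combinations
--     if mask.count('?') <= 6:
--         positions = [i for i, char in enumerate(mask) if char == '?']
--         results = []
--
--         # Generate all combinations for wildcard positions
--         for combo in itertools.product(charset, repeat=len(positions)):
--             password = list(mask)
--             for pos, char in zip(positions, combo):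
--                 password[pos] = char
--             results.append(''.join(password))
--
--         return results
--
--     return []
-- ===== SOURCE B (Python) =====
-- def _generate_from_mask(mask, charset):
--     """Generate passwords from mask with wildcards"""
--     if mask.count('?') > 6:
--         return []
--     results = ['']
--     for ch in mask:
--         if ch == '?':
--             results = [r + c for r in results for c in charset]
--         else:
--             results = [r + ch for r in results]
--     return results
-- ===== Notes on version B (the rewrite author's own statement) =====
-- stated objective: simpler
-- what changed: B builds the result with a single left-to-right fold over the mask characters, extending every partial password (expanding wildcards in place), instead of collecting wildcard positions and patching a copied mask list for each itertools.product combination.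
import Mathlib
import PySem

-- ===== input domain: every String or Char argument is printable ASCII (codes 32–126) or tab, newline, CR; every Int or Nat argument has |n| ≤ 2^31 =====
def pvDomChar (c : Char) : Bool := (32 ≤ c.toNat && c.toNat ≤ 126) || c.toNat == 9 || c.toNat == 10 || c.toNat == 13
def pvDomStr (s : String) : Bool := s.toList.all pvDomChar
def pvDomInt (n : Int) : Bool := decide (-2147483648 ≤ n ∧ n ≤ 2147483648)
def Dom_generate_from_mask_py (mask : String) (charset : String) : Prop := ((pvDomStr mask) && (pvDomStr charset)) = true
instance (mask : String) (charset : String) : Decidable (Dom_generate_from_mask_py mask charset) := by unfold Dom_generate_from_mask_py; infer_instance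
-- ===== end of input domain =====

-- B replaces the positions/itertools.product patching of A by a single left-to-right fold
-- over the mask that extends every partial password (objective: simpler decomposition).


-- ===== PORT A =====
-- itertools.product(cs, repeat=n): first coordinate varies slowest
def pyProduct (cs : List Char) : Nat → List (List Char)
  | 0 => [[]]
  | n+1 => cs.flatMap (fun c => (pyProduct cs n).map (fun rest => c :: rest))

def generate_from_mask_py (mask : String) (charset : String) : List String :=
  let _pattern := PySem.Str.replace mask "?" "."   -- computed by A, never used
  if PySem.Str.count mask "?" ≤ 6 then
    let positions : List Int :=
      (PySem.List.enumerate mask.toList).filterMap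
        (fun p => if p.2 == '?' then some p.1 else none)
    (pyProduct charset.toList positions.length).foldl (fun res combo =>
      let password :=
        (positions.zip combo).foldl
          (fun pw pc => PySem.List.pySetD pw pc.1 pc.2) mask.toList
      res ++ [String.ofList password]) []
  else []

-- ===== PORT B =====
def generate_from_mask_py_alt (mask : String) (charset : String) : List String :=
  if PySem.Str.count mask "?" > 6 then []
  else
    mask.toList.foldl (fun results ch =>
      if ch == '?' then
        results.flatMap (fun r => charset.toList.map (fun c => r.push c))
      else
        results.map (fun r => r.push ch)) [""]

-- ===== PRECONDITION & SPEC =====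
def Spec_generate_from_mask_py (mask : String) (charset : String) (out : List String) : Prop := out = generate_from_mask_py_alt mask charset
instance (mask : String) (charset : String) (out : List String) : Decidable (Spec_generate_from_mask_py mask charset out) := by unfold Spec_generate_from_mask_py; infer_instance

-- ===== CLAIM (what is proved, stated in full; the proofs are below) =====
def Claim_equal_generate_from_mask_py : Prop := ∀ (mask : String) (charset : String), Dom_generate_from_mask_py mask charset → Spec_generate_from_mask_py mask charset (generate_from_mask_py mask charset)

-- ===== LEMMAS AND PROOFS =====

-- wildcard positions of the mask suffix m, indexed from s
def posList (m : List Char) (s : Int) : List Int :=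
  (PySem.List.enumerate m s).filterMap (fun p => if p.2 == '?' then some p.1 else none)

-- the common value: completions of mask m over charset cs (as char lists)
def gen (cs : List Char) : List Char → List (List Char)
  | [] => [[]]
  | ch :: m =>
      if ch == '?' then cs.flatMap (fun c => (gen cs m).map (fun t => c :: t))
      else (gen cs m).map (fun t => ch :: t)

-- A's per-combo patching, structurally
def fill : List Char → List Char → List Char
  | [], _ => []
  | ch :: m, combo =>
      if ch == '?' then
        match combo with
        | [] => ch :: fill m []
        | c :: cb => c :: fill m cb
      else ch :: fill m combo

lemma enum_shift {α : Type} (m : List α) (s : Int) :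
    PySem.List.enumerate m (s + 1) = (PySem.List.enumerate m s).map (fun p => (p.1 + 1, p.2)) := by
  induction m generalizing s with
  | nil => simp [PySem.List.enumerate_nil]
  | cons x xs ih => simp [PySem.List.enumerate_cons, ih]

lemma posList_succ (m : List Char) (s : Int) :
    posList m (s + 1) = (posList m s).map (· + 1) := by
  unfold posList
  rw [enum_shift, List.filterMap_map, List.map_filterMap]
  apply List.filterMap_congr
  intro p _
  by_cases h : p.2 == '?' <;> simp [h, Function.comp]

lemma posList_cons (x : Char) (xs : List Char) (s : Int) :
    posList (x :: xs) s = (if x == '?' then [s] else []) ++ posList xs (s + 1) := by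
  simp only [posList, PySem.List.enumerate_cons, List.filterMap_cons]
  by_cases h : x == '?' <;> simp [h]

lemma posList_nonneg (m : List Char) (s : Int) (hs : 0 ≤ s) :
    ∀ i ∈ posList m s, 0 ≤ i := by
  intro i hi
  rw [posList, List.mem_filterMap] at hi
  obtain ⟨p, hp, he⟩ := hi
  rw [PySem.List.mem_enumerate_iff] at hp
  obtain ⟨k, hk, rfl⟩ := hp
  by_cases h : (m[k] == '?') <;> simp [h] at he
  omega

lemma length_posList (m : List Char) (s : Int) :
    (posList m s).length = m.countP (· == '?') := by
  induction m generalizing s with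
  | nil => simp [posList, PySem.List.enumerate_nil]
  | cons x xs ih =>
      rw [posList_cons, List.length_append, ih, List.countP_cons]
      by_cases h : x == '?' <;> simp [h]
      omega

lemma pySetD_cons_succ (pw : List Char) (p : Int) (c ch : Char) (hp : 0 ≤ p) :
    PySem.List.pySetD (ch :: pw) (p + 1) c = ch :: PySem.List.pySetD pw p c := by
  have h1 := PySem.List.pySetD_of_nonneg (xs := ch :: pw) (i := p + 1) (v := c) (by omega)
  have h2 := PySem.List.pySetD_of_nonneg (xs := pw) (i := p) (v := c) hp
  rw [h1, h2, show (p + 1).toNat = p.toNat + 1 by omega]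
  rfl

lemma setFold_shift (ps : List Int) (combo : List Char) (ch : Char) (pw : List Char)
    (hps : ∀ i ∈ ps, 0 ≤ i) :
    ((ps.map (· + 1)).zip combo).foldl
        (fun pw pc => PySem.List.pySetD pw pc.1 pc.2) (ch :: pw)
      = ch :: (ps.zip combo).foldl (fun pw pc => PySem.List.pySetD pw pc.1 pc.2) pw := by
  induction ps generalizing combo pw with
  | nil => simp
  | cons p ps ih =>
      cases combo with
      | nil => simp
      | cons c cb =>
          have hp : (0:Int) ≤ p := hps p (by simp)
          simp only [List.map_cons, List.zip_cons_cons, List.foldl_cons]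
          rw [pySetD_cons_succ pw p c ch hp]
          exact ih cb _ (fun i hi => hps i (by simp [hi]))

lemma fill_nil_combo (m : List Char) : fill m [] = m := by
  induction m with
  | nil => rfl
  | cons ch m ih => by_cases h : ch == '?' <;> simp [fill, h, ih]

lemma substApply_eq_fill (m : List Char) (combo : List Char) :
    ((posList m 0).zip combo).foldl
        (fun pw pc => PySem.List.pySetD pw pc.1 pc.2) m = fill m combo := by
  induction m generalizing combo with
  | nil => simp [posList, PySem.List.enumerate_nil, fill]
  | cons ch m ih =>
      have hpos : posList (ch :: m) 0
          = (if ch == '?' then [(0:Int)] else []) ++ (posList m 0).map (· + 1) := by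
        rw [posList_cons, zero_add, show (1:Int) = 0 + 1 from rfl, posList_succ]
        norm_num
      by_cases h : ch == '?'
      · rw [hpos]
        simp only [h, if_true]
        cases combo with
        | nil => simp [fill_nil_combo]
        | cons c cb =>
            simp only [List.singleton_append, List.zip_cons_cons, List.foldl_cons]
            have h0 : PySem.List.pySetD (ch :: m) 0 c = c :: m := by
              rw [PySem.List.pySetD_of_nonneg (xs := ch :: m) (i := 0) (v := c) le_rfl]
              rfl
            rw [h0, setFold_shift _ _ _ _ (posList_nonneg m 0 le_rfl), ih]
            simp [fill, h]
      · rw [hpos]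
        simp only [h, if_false, Bool.false_eq_true, List.nil_append]
        rw [setFold_shift _ _ _ _ (posList_nonneg m 0 le_rfl), ih]
        simp [fill, h]

lemma map_fill_product (cs : List Char) (m : List Char) :
    (pyProduct cs (m.countP (· == '?'))).map (fill m) = gen cs m := by
  induction m with
  | nil => simp [pyProduct, fill, gen]
  | cons ch m ih =>
      by_cases h : ch == '?'
      · simp only [List.countP_cons, h, if_true, decide_true, gen]
        simp only [pyProduct, List.map_flatMap]
        rw [← ih]
        congr 1
        funext c
        simp only [List.map_map]
        congr 1
        funext combo
        simp [Function.comp, fill, h]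
      · simp only [List.countP_cons, h, if_false, decide_false, gen, add_zero,
          Bool.false_eq_true]
        rw [← ih]
        simp only [List.map_map]
        congr 1
        funext combo
        simp [Function.comp, fill, h]

lemma bfold (cs : List Char) (m : List Char) (R : List String) :
    m.foldl (fun results ch =>
        if ch == '?' then results.flatMap (fun r => cs.map (fun c => r.push c))
        else results.map (fun r => r.push ch)) R
      = R.flatMap (fun r => (gen cs m).map (fun t => String.ofList (r.toList ++ t))) := by
  induction m generalizing R with
  | nil =>
      simp only [List.foldl_nil, gen, List.map_singleton]
      have : ∀ r : String, [String.ofList (r.toList ++ [])] = [r] := by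
        intro r
        congr 1
        apply String.toList_injective; simp
      simp [this]
  | cons ch m ih =>
      simp only [List.foldl_cons]
      rw [ih]
      by_cases h : ch == '?'
      · simp only [h, if_true, gen, List.flatMap_map, List.map_flatMap]
        rw [List.flatMap_assoc]
        congr 1
        funext r
        rw [List.flatMap_map]
        congr 1
        funext c
        simp only [List.map_map]
        congr 1
        funext t
        apply String.toList_injective; simp
      · simp only [h, if_false, gen, Bool.false_eq_true, List.flatMap_map]
        congr 1
        funext r
        simp only [List.map_map]
        congr 1
        funext t
        apply String.toList_injective; simp

-- ===== VERDICT (by name: the statement is the Claim_ definition above) =====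
theorem generate_from_mask_py_spec : Claim_equal_generate_from_mask_py := by
  intro mask charset _
  unfold Spec_generate_from_mask_py generate_from_mask_py generate_from_mask_py_alt
  by_cases hg : PySem.Str.count mask "?" ≤ 6
  · rw [if_pos hg, if_neg (by omega), bfold]
    simp only [PySem.List.foldl_append_singleton_eq_map, List.nil_append,
      List.flatMap_cons, List.flatMap_nil, List.append_nil, String.toList_empty]
    rw [show (List.filterMap (fun p => if p.2 == '?' then some p.1 else none)
          (PySem.List.enumerate mask.toList)) = posList mask.toList 0 from rfl,
      length_posList]
    rw [show (fun combo => String.ofList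
          (((posList mask.toList 0).zip combo).foldl
            (fun pw pc => PySem.List.pySetD pw pc.1 pc.2) mask.toList))
        = (String.ofList ∘ fill mask.toList) from by
          funext combo; rw [Function.comp_apply, substApply_eq_fill]]
    rw [← List.map_map, map_fill_product]
  · rw [if_neg hg, if_pos (by omega)]
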